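-- pv_equiv track=rewrite | github.com/KillerStrike17/EPAi | 03. Numeric Types/session3.py | encoded_from_base10
-- ===== SOURCE A (Python) =====
-- def encoded_from_base10(number, base, digit_map):
--     '''
--     This function returns a string encoding in the "base" for the the "number" using the "digit_map"
--     Conditions that this function must satisfy:
--     - 2 <= base <= 36 else raise ValueError
--     - invalid base ValueError must have relevant information
--     - digit_map must have sufficient length to represent the base
--     - must return proper encoding for all base ranges between 2 to 36 (including)
--     - must return proper encoding for all negative "numbers" (hint: this is equal to encoding for +ve number, but with - sign added)
--     - the digit_map must not have any repeated character, else ValueError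
--     - the repeating character ValueError message must be relevant
--     - you cannot use any in-built functions in the MATH module
--
--     '''
--
--     if base <2 or base>36:
--         raise ValueError("The base value should be in greaters than equal to 2 and less than equal to 36 ")
--     if len(digit_map)<base:
--         raise ValueError("The digit_map length should be atleast the size of the base so that it can match properly")
--     if len(digit_map) != len(set(digit_map)):
--         raise ValueError("There are repeating words in the string, it requires unique words")
--     digit = []
--     check = 0
--     if number < 0:
--         check = 1
--         number = -number
--     while number> 0:
--         m = number%base
--         number = number // base
--         digit.insert(0,m)
--     if check ==1:
--         return '-'+''.join(map(lambda x:digit_map[x],digit))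
--     else:
--         return ''.join(map(lambda x:digit_map[x],digit))
-- ===== SOURCE B (Python) =====
-- def encoded_from_base10(number, base, digit_map):
--     if base < 2 or base > 36:
--         raise ValueError("The base value should be in greaters than equal to 2 and less than equal to 36 ")
--     if len(digit_map) < base:
--         raise ValueError("The digit_map length should be atleast the size of the base so that it can match properly")
--     if len(digit_map) != len(set(digit_map)):
--         raise ValueError("There are repeating words in the string, it requires unique words")
--
--     def enc(n):
--         return '' if n == 0 else enc(n // base) + digit_map[n % base]
--
--     return ('-' if number < 0 else '') + enc(-number if number < 0 else number)
-- ===== Notes on version B (the rewrite author's own statement) =====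
-- stated objective: simpler
-- what changed: The explicit while-loop with digit list, insert(0,..), sign flag and final join is replaced by a recursive helper enc(n) = enc(n//base) + digit_map[n%base] that builds the string directly, with the sign prefixed once.
import Mathlib
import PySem

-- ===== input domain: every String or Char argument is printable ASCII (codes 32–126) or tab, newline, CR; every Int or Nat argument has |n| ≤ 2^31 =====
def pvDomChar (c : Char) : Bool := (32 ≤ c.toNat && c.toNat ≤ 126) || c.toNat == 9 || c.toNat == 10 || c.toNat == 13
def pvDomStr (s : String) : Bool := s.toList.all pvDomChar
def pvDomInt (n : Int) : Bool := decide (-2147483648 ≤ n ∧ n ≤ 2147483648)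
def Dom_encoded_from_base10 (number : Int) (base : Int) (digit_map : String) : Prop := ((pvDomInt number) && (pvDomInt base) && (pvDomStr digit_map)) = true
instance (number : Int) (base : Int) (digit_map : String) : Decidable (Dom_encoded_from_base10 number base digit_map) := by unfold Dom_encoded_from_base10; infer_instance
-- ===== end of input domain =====

-- B replaces A's while-loop + digit list + insert(0,..) + join with a recursive helper
-- enc(n) = enc(n // base) + digit_map[n % base]; same return value on every input where A returns.

-- ===== PORT A =====
-- the while-loop: digit.insert(0, number % base); number //= base  (fuel = number.toNat is enough: number strictly decreases while positive)
def pvALoop (base : Int) : Nat → Int → List Int → List Int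
  | 0, _, digit => digit
  | f + 1, n, digit =>
      if n > 0 then pvALoop base f (PySem.Int.floordiv n base) (PySem.Int.mod n base :: digit)
      else digit

def encoded_from_base10 (number : Int) (base : Int) (digit_map : String) : String :=
  if base < 2 ∨ base > 36 then "" -- Python raises ValueError here: excluded by Pre_
  else if (digit_map.toList.length : Int) < base then "" -- ValueError: excluded by Pre_
  else if ¬ digit_map.toList.Nodup then "" -- ValueError (len != len(set)): excluded by Pre_
  else
    let check : Int := if number < 0 then 1 else 0
    let n : Int := if number < 0 then -number else number
    let digit := pvALoop base n.toNat n []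
    -- digit_map[x]: in-range inside Pre_ (0 ≤ x < base ≤ len); getD never fires there
    let body := digit.map (fun x => (PySem.Str.pyGet? digit_map x).getD ' ')
    if check == 1 then String.ofList ('-' :: body) else String.ofList body

-- ===== PORT B =====
-- enc(n): '' if n == 0 else enc(n // base) + digit_map[n % base]   (fuel = n.toNat)
def pvEnc (base : Int) (digit_map : String) : Nat → Int → List Char
  | 0, _ => []
  | f + 1, n =>
      if n == 0 then []
      else pvEnc base digit_map f (PySem.Int.floordiv n base) ++
           [(PySem.Str.pyGet? digit_map (PySem.Int.mod n base)).getD ' ']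

def encoded_from_base10_alt (number : Int) (base : Int) (digit_map : String) : String :=
  if base < 2 ∨ base > 36 then "" -- ValueError: excluded by Pre_
  else if (digit_map.toList.length : Int) < base then "" -- ValueError: excluded by Pre_
  else if ¬ digit_map.toList.Nodup then "" -- ValueError: excluded by Pre_
  else
    let n : Int := if number < 0 then -number else number
    String.ofList ((if number < 0 then ['-'] else []) ++ pvEnc base digit_map n.toNat n)

-- ===== PRECONDITION & SPEC =====
-- Pre_ excludes exactly the inputs where A raises ValueError (bad base, short digit_map, repeated chars); B raises the same errors there.
def Pre_encoded_from_base10 (number : Int) (base : Int) (digit_map : String) : Prop :=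
  2 ≤ base ∧ base ≤ 36 ∧ base ≤ (digit_map.toList.length : Int) ∧ digit_map.toList.Nodup
instance (number : Int) (base : Int) (digit_map : String) : Decidable (Pre_encoded_from_base10 number base digit_map) := by unfold Pre_encoded_from_base10; infer_instance

def pvWitness_encoded_from_base10 : Int × Int × String := (42, 16, "0123456789abcdef")

def Spec_encoded_from_base10 (number : Int) (base : Int) (digit_map : String) (out : String) : Prop := out = encoded_from_base10_alt number base digit_map
instance (number : Int) (base : Int) (digit_map : String) (out : String) : Decidable (Spec_encoded_from_base10 number base digit_map out) := by unfold Spec_encoded_from_base10; infer_instance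

-- ===== CLAIM (what is proved, stated in full; the proofs are below) =====
def Claim_equal_encoded_from_base10 : Prop := ∀ (number : Int) (base : Int) (digit_map : String), Dom_encoded_from_base10 number base digit_map → Pre_encoded_from_base10 number base digit_map → Spec_encoded_from_base10 number base digit_map (encoded_from_base10 number base digit_map)

-- ===== LEMMAS AND PROOFS =====

theorem pvWitness_ok : Dom_encoded_from_base10 pvWitness_encoded_from_base10.1 pvWitness_encoded_from_base10.2.1 pvWitness_encoded_from_base10.2.2 ∧ Pre_encoded_from_base10 pvWitness_encoded_from_base10.1 pvWitness_encoded_from_base10.2.1 pvWitness_encoded_from_base10.2.2 := by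
  constructor <;> decide

theorem pvFloordiv_lt (n base : Int) (hb : 2 ≤ base) (hn : 0 < n) :
    PySem.Int.floordiv n base < n ∧ 0 ≤ PySem.Int.floordiv n base := by
  constructor
  · rw [PySem.Int.floordiv_lt_iff_lt_mul (by omega)]
    nlinarith
  · rw [PySem.Int.le_floordiv_iff_mul_le (by omega)]
    omega

-- the loop of A, mapped through digit_map, is exactly B's enc followed by the mapped accumulator
theorem pvLoop_eq_enc (base : Int) (digit_map : String) (hb : 2 ≤ base) :
    ∀ (f : Nat) (n : Int) (acc : List Int), 0 ≤ n → n.toNat ≤ f →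
      (pvALoop base f n acc).map (fun x => (PySem.Str.pyGet? digit_map x).getD ' ') =
        pvEnc base digit_map f n ++ acc.map (fun x => (PySem.Str.pyGet? digit_map x).getD ' ') := by
  intro f
  induction f with
  | zero =>
      intro n acc hn hf
      have : n = 0 := by omega
      subst this
      simp [pvALoop, pvEnc]
  | succ f ih =>
      intro n acc hn hf
      by_cases hpos : n > 0
      · have hd := pvFloordiv_lt n base hb hpos
        have hfuel : (PySem.Int.floordiv n base).toNat ≤ f := by omega
        have hne : ¬ (n == 0) = true := by simp; omega
        simp only [pvALoop, pvEnc, if_pos hpos, if_neg hne]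
        rw [ih (PySem.Int.floordiv n base) (PySem.Int.mod n base :: acc) hd.2 hfuel]
        simp
      · have : n = 0 := by omega
        subst this
        simp [pvALoop, pvEnc]

-- ===== VERDICT (by name: the statement is the Claim_ definition above) =====
theorem encoded_from_base10_spec : Claim_equal_encoded_from_base10 := by
  intro number base digit_map _ hpre
  obtain ⟨hb2, hb36, hlen, hnd⟩ := hpre
  have h1 : ¬ (base < 2 ∨ base > 36) := by omega
  have h2 : ¬ ((digit_map.toList.length : Int) < base) := by omega
  have h3 : ¬ ¬ digit_map.toList.Nodup := not_not_intro hnd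
  unfold Spec_encoded_from_base10 encoded_from_base10 encoded_from_base10_alt
  simp only [if_neg h1, if_neg h2, if_neg h3]
  by_cases hneg : number < 0
  · simp only [if_pos hneg]
    rw [pvLoop_eq_enc base digit_map hb2 (-number).toNat (-number) [] (by omega) le_rfl]
    simp
  · simp only [if_neg hneg]
    rw [pvLoop_eq_enc base digit_map hb2 number.toNat number [] (by omega) le_rfl]
    simp
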